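-- pv_equiv track=rewrite | github.com/Abdul-Logiclion/HackerRank-Interview-Prep-Problem-Solving- | day6_problem3.py | cookies
-- ===== SOURCE A (Python) =====
-- import heapq  # Importing heapq module for using min-heap functionality
--
-- def cookies(k, A):
--     # Convert the input list A into a min-heap in-place
--     # After this, the smallest element will always be at index 0
--     heapq.heapify(A)
--
--     count = 0  # Counter to track the number of operations performed
--
--     # Continue combining cookies until the smallest cookie is at least 'k'
--     # and there are at least 2 cookies to combine
--     while len(A) >= 2 and A[0] < k:
--         # Extract the two least sweet cookies (smallest values)
--         first = heapq.heappop(A)  # Least sweet cookie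
--         second = heapq.heappop(A) # Second least sweet cookie
--
--         # Combine them into a new cookie with new sweetness formula:
--         # new_cookie = least + 2 * second_least
--         new_cookie = first + 2 * second
--
--         # Push the new cookie back into the heap to maintain the heap structure
--         heapq.heappush(A, new_cookie)
--
--         # Increment the operation counter
--         count += 1
--
--     # After processing, if the smallest remaining cookie is still less than 'k',
--     # and there's no way to combine further (only 1 cookie left), return -1
--     return count if A and A[0] >= k else -1
-- ===== SOURCE B (Python) =====
-- def cookies(k, A):
--     # Sort once; keep the working list sorted, inserting each combined cookie
--     # at its position found by hand-written binary search.
--     s = sorted(A)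
--     count = 0
--     while len(s) >= 2 and s[0] < k:
--         new = s[0] + 2 * s[1]
--         del s[:2]
--         lo, hi = 0, len(s)
--         while lo < hi:
--             mid = (lo + hi) // 2
--             if s[mid] < new:
--                 lo = mid + 1
--             else:
--                 hi = mid
--         s.insert(lo, new)
--         count += 1
--     return count if s and s[0] >= k else -1
-- ===== Notes on version B (the rewrite author's own statement) =====
-- stated objective: alternative
-- what changed: Replaces the heapq min-heap with a list sorted once and kept ordered by binary-search insertion of each combined cookie; B also leaves the caller's list unmutated where A heapifies and pops it in place.
import Mathlib
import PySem

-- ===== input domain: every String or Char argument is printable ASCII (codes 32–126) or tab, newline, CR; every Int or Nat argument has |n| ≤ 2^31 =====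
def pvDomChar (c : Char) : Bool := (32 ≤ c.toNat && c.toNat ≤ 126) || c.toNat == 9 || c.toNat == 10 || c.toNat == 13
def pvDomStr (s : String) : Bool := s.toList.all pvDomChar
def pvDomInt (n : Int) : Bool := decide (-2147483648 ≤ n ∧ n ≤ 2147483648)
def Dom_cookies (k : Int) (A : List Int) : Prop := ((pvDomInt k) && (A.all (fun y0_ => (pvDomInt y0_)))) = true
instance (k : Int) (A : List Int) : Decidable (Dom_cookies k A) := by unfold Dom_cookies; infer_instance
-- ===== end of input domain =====

-- B replaces A's heapq min-heap by a sort-once working list kept ordered by binary-search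
-- insertion of each combined cookie (objective: alternative). Equivalence is about the RETURN value only:
-- Python A heapifies and pops the caller's list in place, B leaves it unchanged.

-- ===== PORT A =====
-- heapq is ported by its observable semantics: the heap is the multiset of its
-- elements, A[0]/heappop is the minimum (PySem.List.min?), heappush appends.
-- The `.getD 0` defaults are never reached: each read is guarded by a length test,
-- exactly as Python's short-circuit `len(A) >= 2 and A[0] < k` / `A and A[0] >= k`.
def cookiesLoopA (k : Int) (h : List Int) (c : Int) : Int :=
  if hc : 2 ≤ h.length ∧ (PySem.List.min? h (fun y => y)).getD 0 < k then
    let first := (PySem.List.min? h (fun y => y)).getD 0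
    let h1 := h.erase first
    let second := (PySem.List.min? h1 (fun y => y)).getD 0
    cookiesLoopA k ((h1.erase second) ++ [first + 2 * second]) (c + 1)
  else
    if 1 ≤ h.length ∧ k ≤ (PySem.List.min? h (fun y => y)).getD 0 then c else -1
termination_by h.length
decreasing_by
  have hne : h ≠ [] := by intro h0; simp [h0] at hc
  obtain ⟨m, hm⟩ : ∃ m, PySem.List.min? h (fun y => y) = some m := by
    cases hmm : PySem.List.min? h (fun y => y) with
    | none => exact absurd ((PySem.List.min?_eq_none_iff h _).mp hmm) hne
    | some m => exact ⟨m, rfl⟩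
  have hm1 : m ∈ h := PySem.List.min?_mem hm
  simp only [hm, Option.getD_some]
  have hlen1 : (h.erase m).length = h.length - 1 := List.length_erase_of_mem hm1
  have hne1 : h.erase m ≠ [] := by
    intro h0
    have := congrArg List.length h0
    rw [hlen1] at this
    simp at this
    omega
  obtain ⟨m2, hm2⟩ : ∃ m2, PySem.List.min? (h.erase m) (fun y => y) = some m2 := by
    cases hmm : PySem.List.min? (h.erase m) (fun y => y) with
    | none => exact absurd ((PySem.List.min?_eq_none_iff _ _).mp hmm) hne1
    | some m2 => exact ⟨m2, rfl⟩
  have hlen2 : ((h.erase m).erase m2).length = (h.erase m).length - 1 :=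
    List.length_erase_of_mem (PySem.List.min?_mem hm2)
  simp only [hm2, Option.getD_some, List.length_append, List.length_cons, List.length_nil,
    hlen2, hlen1]
  omega

def cookies (k : Int) (A : List Int) : Int :=
  cookiesLoopA k A 0

-- ===== PORT B =====
-- Source B's hand-written binary search: find the insertion point for x in s
-- (s[mid] is always in range in Python since mid < hi <= len(s); ported as getD,
-- whose default is never reached under that guard)
def bsLoop (s : List Int) (x : Int) (lo hi : Nat) : Nat :=
  if lo < hi then
    let mid := (lo + hi) / 2
    if s.getD mid 0 < x then bsLoop s x (mid + 1) hi else bsLoop s x lo mid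
  else lo
termination_by hi - lo
decreasing_by all_goals omega

def cookiesLoopB (k : Int) (s : List Int) (c : Int) : Int :=
  match s with
  | a :: b :: rest =>
    if a < k then
      cookiesLoopB k
        (PySem.List.insert rest (↑(bsLoop rest (a + 2 * b) 0 rest.length)) (a + 2 * b)) (c + 1)
    else if k ≤ a then c else -1
  | [a] => if k ≤ a then c else -1
  | [] => -1
termination_by s.length
decreasing_by simp [PySem.List.length_insert]

def cookies_alt (k : Int) (A : List Int) : Int :=
  cookiesLoopB k (PySem.List.sorted A (fun y => y) false) 0

-- ===== PRECONDITION & SPEC =====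
def Spec_cookies (k : Int) (A : List Int) (out : Int) : Prop := out = cookies_alt k A
instance (k : Int) (A : List Int) (out : Int) : Decidable (Spec_cookies k A out) := by unfold Spec_cookies; infer_instance

-- ===== CLAIM (what is proved, stated in full; the proofs are below) =====
def Claim_equal_cookies : Prop := ∀ (k : Int) (A : List Int), Dom_cookies k A → Spec_cookies k A (cookies k A)

-- ===== LEMMAS AND PROOFS =====

-- proof-side model of B's insertion: linear insert before the first element ≥ x
def insertSorted (x : Int) : List Int → List Int
  | [] => [x]
  | y :: ys => if y < x then y :: insertSorted x ys else x :: y :: ys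

theorem insertAt_eq (x : Int) : ∀ (s : List Int) (p : Nat), p ≤ s.length →
    (∀ j (_ : j < s.length), j < p → s[j] < x) →
    (∀ j (_ : j < s.length), p ≤ j → x ≤ s[j]) →
    s.take p ++ x :: s.drop p = insertSorted x s := by
  intro s
  induction s with
  | nil =>
    intro p hp _ _
    have : p = 0 := by simpa using hp
    subst this
    simp [insertSorted]
  | cons y ys ih =>
    intro p hp hlt hge
    match p with
    | 0 =>
      have hxy : x ≤ y := hge 0 (by simp) (by omega)
      simp [insertSorted, not_lt.mpr hxy]
    | q + 1 =>
      have hyx : y < x := hlt 0 (by simp) (by omega)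
      have : (y :: ys).take (q+1) ++ x :: (y :: ys).drop (q+1)
           = y :: (ys.take q ++ x :: ys.drop q) := by simp
      rw [this, insertSorted, if_pos hyx]
      congr 1
      refine ih q (by simpa using hp) ?_ ?_
      · intro j hj hjq; exact hlt (j+1) (by simpa using hj) (by omega)
      · intro j hj hjq; exact hge (j+1) (by simpa using hj) (by omega)

theorem bsLoop_spec (x : Int) (s : List Int) (hs : s.Pairwise (· ≤ ·)) :
    ∀ (d lo hi : Nat), hi - lo ≤ d → lo ≤ hi → hi ≤ s.length →
    (∀ j (_ : j < s.length), j < lo → s[j] < x) →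
    (∀ j (_ : j < s.length), hi ≤ j → x ≤ s[j]) →
    bsLoop s x lo hi ≤ s.length ∧
    (∀ j (_ : j < s.length), j < bsLoop s x lo hi → s[j] < x) ∧
    (∀ j (_ : j < s.length), bsLoop s x lo hi ≤ j → x ≤ s[j]) := by
  have hmono : ∀ i j (hi : i < s.length) (hj : j < s.length), i ≤ j → s[i] ≤ s[j] := by
    intro i j hi hj hij
    rcases Nat.lt_or_ge i j with h | h
    · exact (List.pairwise_iff_getElem.mp hs) i j hi hj h
    · have : i = j := by omega
      subst this; rfl
  intro d
  induction d with
  | zero =>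
    intro lo hi hd hlohi hhi hlt hge
    have : lo = hi := by omega
    subst this
    rw [bsLoop]
    simp only [lt_irrefl, if_false]
    exact ⟨by omega, hlt, hge⟩
  | succ d ihd =>
    intro lo hi hd hlohi hhi hlt hge
    rw [bsLoop]
    by_cases hlh : lo < hi
    · rw [if_pos hlh]
      simp only
      have hmidlt : (lo + hi) / 2 < s.length := by omega
      have hgetd : s.getD ((lo + hi) / 2) 0 = s[(lo + hi) / 2] := by
        rw [List.getD_eq_getElem?_getD, List.getElem?_eq_getElem hmidlt]; rfl
      by_cases hc : s.getD ((lo + hi) / 2) 0 < x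
      · rw [if_pos hc]
        refine ihd ((lo + hi) / 2 + 1) hi (by omega) (by omega) hhi ?_ hge
        intro j hj hjm
        calc s[j] ≤ s[(lo + hi) / 2] := hmono j _ hj hmidlt (by omega)
          _ < x := by rw [← hgetd]; exact hc
      · rw [if_neg hc]
        refine ihd lo ((lo + hi) / 2) (by omega) (by omega) (by omega) hlt ?_
        intro j hj hjm
        calc x ≤ s[(lo + hi) / 2] := by rw [← hgetd]; exact not_lt.mp hc
          _ ≤ s[j] := hmono _ j hmidlt hj (by omega)
    · rw [if_neg hlh]
      have : lo = hi := by omega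
      subst this
      exact ⟨by omega, hlt, hge⟩

-- B's binary-search insertion equals linear sorted insertion on a sorted list
theorem insert_bsLoop_eq (x : Int) {s : List Int} (hs : s.Pairwise (· ≤ ·)) :
    PySem.List.insert s (↑(bsLoop s x 0 s.length)) x = insertSorted x s := by
  obtain ⟨hle, hlt, hge⟩ := bsLoop_spec x s hs s.length 0 s.length (by omega) (by omega)
    le_rfl (by omega) (by intro j hj hjj; omega)
  rw [PySem.List.insert_natCast s _ x hle]
  exact insertAt_eq x s _ hle hlt hge

-- the head of a sorted rearrangement of h is what min? finds on h
theorem min?_of_perm_sorted {h : List Int} {a : Int} {t : List Int}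
    (hp : (a :: t).Perm h) (hs : (a :: t).Pairwise (· ≤ ·)) :
    PySem.List.min? h (fun y => y) = some a := by
  have hne : h ≠ [] := by
    intro h0; subst h0; exact absurd hp.length_eq (by simp)
  obtain ⟨m, hm⟩ : ∃ m, PySem.List.min? h (fun y => y) = some m := by
    cases hmm : PySem.List.min? h (fun y => y) with
    | none => exact absurd ((PySem.List.min?_eq_none_iff h _).mp hmm) hne
    | some m => exact ⟨m, rfl⟩
  have hmem : m ∈ a :: t := hp.mem_iff.mpr (PySem.List.min?_mem hm)
  have ham : a ≤ m := by
    rcases List.mem_cons.mp hmem with h' | h'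
    · exact le_of_eq h'.symm
    · exact (List.pairwise_cons.mp hs).1 m h'
  have hma : m ≤ a := PySem.List.min?_isMin hm a (hp.mem_iff.mp (by simp))
  rw [hm]
  exact congrArg some (le_antisymm hma ham)

theorem insertSorted_perm (x : Int) (l : List Int) :
    (insertSorted x l).Perm (x :: l) := by
  induction l with
  | nil => exact List.Perm.refl _
  | cons y ys ih =>
    simp only [insertSorted]
    split
    · exact (ih.cons y).trans (List.Perm.swap x y ys)
    · exact List.Perm.refl _

theorem insertSorted_pairwise (x : Int) {l : List Int}
    (hl : l.Pairwise (· ≤ ·)) : (insertSorted x l).Pairwise (· ≤ ·) := by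
  induction l with
  | nil => simp [insertSorted]
  | cons y ys ih =>
    rcases List.pairwise_cons.mp hl with ⟨hy, hys⟩
    simp only [insertSorted]
    split
    · rename_i hlt
      refine List.pairwise_cons.mpr ⟨?_, ih hys⟩
      intro z hz
      rcases List.mem_cons.mp ((insertSorted_perm x ys).mem_iff.mp hz) with h' | h'
      · omega
      · exact hy z h'
    · rename_i hge
      refine List.pairwise_cons.mpr ⟨?_, hl⟩
      intro z hz
      rcases List.mem_cons.mp hz with h' | h'
      · omega
      · have := hy z h'; omega

-- the bisimulation: A's min-extraction loop = B's sorted-list loop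
theorem loopB_nil (k : Int) (c : Int) : cookiesLoopB k [] c = -1 := by
  rw [cookiesLoopB.eq_def]

theorem loopB_one (k a : Int) (c : Int) :
    cookiesLoopB k [a] c = if k ≤ a then c else -1 := by
  rw [cookiesLoopB.eq_def]

theorem loopB_cons2 (k a b : Int) (rest : List Int) (c : Int)
    (hrest : rest.Pairwise (· ≤ ·)) :
    cookiesLoopB k (a :: b :: rest) c =
      if a < k then cookiesLoopB k (insertSorted (a + 2 * b) rest) (c + 1)
      else if k ≤ a then c else -1 := by
  rw [cookiesLoopB.eq_def]
  simp only [insert_bsLoop_eq _ hrest]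

-- the bisimulation: A's min-extraction loop = B's sorted-list loop
theorem loop_bisim (k : Int) : ∀ (n : ℕ) (h s : List Int) (c : Int),
    h.length ≤ n → s.Perm h → s.Pairwise (· ≤ ·) →
    cookiesLoopA k h c = cookiesLoopB k s c := by
  intro n
  induction n with
  | zero =>
    intro h s c hlen hp _
    have : h = [] := List.length_eq_zero_iff.mp (by omega)
    subst this
    have : s = [] := hp.eq_nil
    subst this
    rw [cookiesLoopA.eq_def, loopB_nil]
    simp
  | succ n ih =>
    intro h s c hlen hp hs
    match s with
    | [] =>
      have : h = [] := hp.symm.eq_nil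
      subst this
      rw [cookiesLoopA.eq_def, loopB_nil]
      simp
    | [a] =>
      have hmin : PySem.List.min? h (fun y => y) = some a := min?_of_perm_sorted hp hs
      have hl : h.length = 1 := by simpa using hp.length_eq.symm
      rw [cookiesLoopA.eq_def, loopB_one]
      rw [dif_neg (by rw [hmin]; simp [hl])]
      rw [hmin]
      simp [hl]
    | a :: b :: rest =>
      have hmin : PySem.List.min? h (fun y => y) = some a := min?_of_perm_sorted hp hs
      have hl : h.length = rest.length + 2 := by simpa using hp.length_eq.symm
      have hpe : (b :: rest).Perm (h.erase a) := by
        have := hp.erase a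
        simpa using this
      have hse : (b :: rest).Pairwise (· ≤ ·) := (List.pairwise_cons.mp hs).2
      have hmin2 : PySem.List.min? (h.erase a) (fun y => y) = some b :=
        min?_of_perm_sorted hpe hse
      have hrests : rest.Pairwise (· ≤ ·) := (List.pairwise_cons.mp hse).2
      rw [cookiesLoopA.eq_def, loopB_cons2 k a b rest c hrests]
      by_cases hak : a < k
      · rw [dif_pos (by rw [hmin]; exact ⟨by omega, by simpa using hak⟩), if_pos hak]
        simp only [hmin, hmin2, Option.getD_some]
        apply ih
        · have h1 : (h.erase a).length = h.length - 1 :=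
            List.length_erase_of_mem (hp.mem_iff.mp (by simp))
          have h2 : ((h.erase a).erase b).length = (h.erase a).length - 1 :=
            List.length_erase_of_mem (hpe.mem_iff.mp (by simp))
          simp only [List.length_append, List.length_cons, List.length_nil, h2, h1]
          omega
        · refine ((insertSorted_perm _ rest).trans ?_)
          have hr : rest.Perm ((h.erase a).erase b) := by
            have := hpe.erase b
            simpa using this
          exact ((hr.cons _).trans (List.perm_append_singleton _ _).symm)
        · exact insertSorted_pairwise _ (List.pairwise_cons.mp hse).2
      · rw [dif_neg (by rw [hmin]; intro hcc; exact hak (by simpa using hcc.2)), if_neg hak]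
        rw [hmin]
        simp [hl]

-- ===== VERDICT (by name: the statement is the Claim_ definition above) =====
theorem cookies_spec : Claim_equal_cookies := by
  intro k A _
  unfold Spec_cookies cookies cookies_alt
  exact loop_bisim k A.length A (PySem.List.sorted A (fun y => y) false) 0 le_rfl
    (PySem.List.sorted_perm A _ false) (PySem.List.sorted_pairwise A _)
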